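-- pv_equiv track=rewrite | github.com/13ud/Functions-made-in-FoC | obfuscate_text.py | obfuscate_text
-- ===== SOURCE A (Python) =====
-- def obfuscate_text(text):
--     subs = {'a': '@', 's': '$', 'i': '!', 'e': '3', 'l': '1'}
--
--     obs_text = ''
--     short_text = ''
--     prev_char = ''
--     i = 0
--
--     for c in text:
--         if c == prev_char:
--             continue
--         short_text += c
--         prev_char = c
--
--     while i < len(short_text):
--         if short_text[i] in subs:
--             obs_text += subs[short_text[i]]
--         elif i % 2 == 0:
--             obs_text += short_text[i].upper()
--         else:
--             obs_text += short_text[i]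
--         i += 1
--
--     return obs_text
-- ===== SOURCE B (Python) =====
-- def obfuscate_text(text):
--     subs = {'a': '@', 's': '$', 'i': '!', 'e': '3', 'l': '1'}
--     out = []
--     prev = None
--     n = 0
--     for c in text:
--         if c == prev:
--             continue
--         prev = c
--         if c in subs:
--             out.append(subs[c])
--         elif n % 2 == 0:
--             out.append(c.upper())
--         else:
--             out.append(c)
--         n += 1
--     return ''.join(out)
-- ===== Notes on version B (the rewrite author's own statement) =====
-- stated objective: simpler
-- what changed: Fused A's two passes (build deduped intermediate string, then index-scan it with parity-based casing) into a single scan over the input that keeps prev-char and an emitted-count, appending each result char directly; no intermediate string and no index arithmetic.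
import Mathlib
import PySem

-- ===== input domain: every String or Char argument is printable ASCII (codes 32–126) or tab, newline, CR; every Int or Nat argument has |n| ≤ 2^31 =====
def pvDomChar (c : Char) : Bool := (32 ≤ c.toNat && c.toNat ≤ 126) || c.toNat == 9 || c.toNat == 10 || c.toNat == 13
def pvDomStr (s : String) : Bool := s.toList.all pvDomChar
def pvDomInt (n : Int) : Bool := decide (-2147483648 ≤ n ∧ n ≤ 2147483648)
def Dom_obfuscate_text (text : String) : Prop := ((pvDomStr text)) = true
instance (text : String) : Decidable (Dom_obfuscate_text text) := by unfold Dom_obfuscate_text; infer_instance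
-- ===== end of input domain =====

-- B fuses A's two passes (dedupe into an intermediate string, then index-scan it with
-- parity casing) into one scan keeping prev-char and an emitted-count: simpler, no
-- intermediate string.

-- ===== PORT A =====
-- the subs dict literal (shared table of both Pythons)
def obSubs : PySem.Dict Char Char :=
  PySem.Dict.ofList [('a', '@'), ('s', '$'), ('i', '!'), ('e', '3'), ('l', '1')]

-- A's while loop: i walks the deduped text, appending to obs
def obfuscate_text_loop2 (short : List Char) (i : Nat) (obs : List Char) : List Char :=
  if h : i < short.length then
    let ch := short[i]
    let obs' :=
      match PySem.Dict.get? obSubs ch with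
      | some r => obs ++ [r]
      | none => if i % 2 = 0 then obs ++ [ch.toUpper] else obs ++ [ch]
    obfuscate_text_loop2 short (i + 1) obs'
  else obs
termination_by short.length - i

def obfuscate_text (text : String) : String :=
  -- first loop: build short_text, skipping chars equal to prev_char (initially '' = none)
  let st := text.toList.foldl
    (fun (st : List Char × Option Char) c =>
      if some c = st.2 then st else (st.1 ++ [c], some c)) ([], none)
  String.ofList (obfuscate_text_loop2 st.1 0 [])

-- ===== PORT B =====
def obfuscate_text_alt (text : String) : String :=
  -- single scan: (out, prev, n) where n counts emitted characters
  let r := text.toList.foldl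
    (fun (st : List Char × Option Char × Nat) c =>
      if some c = st.2.1 then st
      else
        let out :=
          match PySem.Dict.get? obSubs c with
          | some r => st.1 ++ [r]
          | none => if st.2.2 % 2 = 0 then st.1 ++ [c.toUpper] else st.1 ++ [c]
        (out, some c, st.2.2 + 1)) ([], none, 0)
  String.ofList r.1

-- ===== PRECONDITION & SPEC =====
def Spec_obfuscate_text (text : String) (out : String) : Prop := out = obfuscate_text_alt text
instance (text : String) (out : String) : Decidable (Spec_obfuscate_text text out) := by unfold Spec_obfuscate_text; infer_instance

-- ===== CLAIM (what is proved, stated in full; the proofs are below) =====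
def Claim_equal_obfuscate_text : Prop := ∀ (text : String), Dom_obfuscate_text text → Spec_obfuscate_text text (obfuscate_text text)

-- ===== LEMMAS AND PROOFS =====

-- the character emitted for the n-th kept char c
def obEmit (n : Nat) (c : Char) : Char :=
  match PySem.Dict.get? obSubs c with
  | some r => r
  | none => if n % 2 = 0 then c.toUpper else c

-- what A's first loop computes
def obDedup : List Char → Option Char → List Char
  | [], _ => []
  | c :: cs, p => if some c = p then obDedup cs p else c :: obDedup cs (some c)

-- what both second phases compute on the deduped list
def obTfm : Nat → List Char → List Char
  | _, [] => []
  | n, c :: cs => obEmit n c :: obTfm (n + 1) cs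

lemma obA_loop1 (cs : List Char) : ∀ (acc : List Char) (p : Option Char),
    (cs.foldl (fun (st : List Char × Option Char) c =>
      if some c = st.2 then st else (st.1 ++ [c], some c)) (acc, p)).1
      = acc ++ obDedup cs p := by
  induction cs with
  | nil => simp [obDedup]
  | cons c cs ih =>
    intro acc p
    by_cases h : some c = p <;> simp [obDedup, h, ih]

lemma obA_loop2 (s : List Char) : ∀ (k i : Nat) (obs : List Char), s.length - i = k →
    obfuscate_text_loop2 s i obs = obs ++ obTfm i (s.drop i) := by
  intro k
  induction k with
  | zero =>
    intro i obs hk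
    rw [obfuscate_text_loop2]
    rw [dif_neg (by omega)]
    rw [List.drop_eq_nil_of_le (by omega)]
    simp [obTfm]
  | succ k ih =>
    intro i obs hk
    have h : i < s.length := by omega
    rw [obfuscate_text_loop2, dif_pos h, ih (i + 1) _ (by omega)]
    rw [List.drop_eq_getElem_cons h]
    show (match PySem.Dict.get? obSubs s[i] with
      | some r => obs ++ [r]
      | none => if i % 2 = 0 then obs ++ [s[i].toUpper] else obs ++ [s[i]]) ++ _ = _
    simp only [obTfm, obEmit]
    cases PySem.Dict.get? obSubs s[i] <;> simp <;> split_ifs <;> simp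

lemma obB_loop (cs : List Char) : ∀ (acc : List Char) (p : Option Char) (n : Nat),
    (cs.foldl (fun (st : List Char × Option Char × Nat) c =>
      if some c = st.2.1 then st
      else
        let out :=
          match PySem.Dict.get? obSubs c with
          | some r => st.1 ++ [r]
          | none => if st.2.2 % 2 = 0 then st.1 ++ [c.toUpper] else st.1 ++ [c]
        (out, some c, st.2.2 + 1)) (acc, p, n)).1
      = acc ++ obTfm n (obDedup cs p) := by
  induction cs with
  | nil => simp [obDedup, obTfm]
  | cons c cs ih =>
    intro acc p n
    by_cases h : some c = p
    · simp [obDedup, h, ih]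
    · simp only [List.foldl_cons, if_neg h]
      rw [ih]
      simp only [obDedup, if_neg h, obTfm, obEmit]
      cases PySem.Dict.get? obSubs c <;> simp <;> split_ifs <;> simp

-- ===== VERDICT (by name: the statement is the Claim_ definition above) =====
theorem obfuscate_text_spec : Claim_equal_obfuscate_text := by
  intro text _
  unfold Spec_obfuscate_text obfuscate_text obfuscate_text_alt
  simp only [obA_loop1, obB_loop, List.nil_append]
  rw [obA_loop2 _ (obDedup text.toList none).length 0 [] (by omega)]
  simp
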